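-- pv_equiv track=rewrite | github.com/gnklakshan/IEEEXtreme-17-Code-Submissions | anothersliding.py | calculate_optimal_cost
-- ===== SOURCE A (Python) =====
-- def calculate_optimal_cost(A):
--     N = len(A)
--     optimal_costs = []
--
--     for l in range(N):
--         for r in range(l, N):
--             # Calculate the optimal cost for the subarray A[l...r]
--             length = r - l + 1
--             if length % 2 == 0:
--                 # If even, group elements into pairs
--                 max_sum = float('-inf')
--                 for i in range(length // 2):
--                     max_sum = max(max_sum, A[l + i] + A[r - i])
--             else:
--                 # If odd, one group will have a single element
--                 max_sum = float('-inf')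
--                 for i in range(length // 2):
--                     max_sum = max(max_sum, A[l + i] + A[r - i])
--                 max_sum = max(max_sum, A[l + length // 2])  # single element case
--
--             optimal_costs.append(max_sum)
--
--     return optimal_costs
-- ===== SOURCE B (Python) =====
-- def calculate_optimal_cost(A):
--     # DP over rows from the last left index upward:
--     # cost(l, r) = max(A[l] + A[r], cost(l+1, r-1)), cost(l, l) = A[l].
--     N = len(A)
--     rows = []          # rows for l = N-1, N-2, ..., 0 (built bottom-up)
--     prev = []          # row for l+1: prev[k] = cost(l+1, l+1+k)
--     for l in range(N - 1, -1, -1):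
--         row = [A[l]]
--         for r in range(l + 1, N):
--             s = A[l] + A[r]
--             if r >= l + 2:
--                 s = max(s, prev[r - l - 2])
--             row.append(s)
--         rows.append(row)
--         prev = row
--     rows.reverse()
--     return [c for row in rows for c in row]
-- ===== Notes on version B (the rewrite author's own statement) =====
-- stated objective: faster
-- what changed: B replaces A's O(N^3) rescan of all symmetric pairs of every subarray by an O(N^2) dynamic program on the recurrence cost(l,r) = max(A[l]+A[r], cost(l+1,r-1)), filling rows for decreasing left index and flattening them.
import Mathlib
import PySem

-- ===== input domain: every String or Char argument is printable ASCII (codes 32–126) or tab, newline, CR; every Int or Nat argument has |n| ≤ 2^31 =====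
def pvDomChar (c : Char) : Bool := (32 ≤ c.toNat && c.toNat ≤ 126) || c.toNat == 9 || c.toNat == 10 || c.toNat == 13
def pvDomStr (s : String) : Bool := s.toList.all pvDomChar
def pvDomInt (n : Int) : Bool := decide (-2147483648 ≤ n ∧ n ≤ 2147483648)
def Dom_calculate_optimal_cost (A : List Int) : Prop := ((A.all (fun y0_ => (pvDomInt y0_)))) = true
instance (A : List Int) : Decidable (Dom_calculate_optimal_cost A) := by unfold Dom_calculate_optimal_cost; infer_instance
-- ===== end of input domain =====

-- B replaces A's rescan of every pair of every subarray by a row-by-row DP on the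
-- recurrence cost(l,r) = max(A[l]+A[r], cost(l+1,r-1)) (objective: faster).

-- ===== PORT A =====
-- float('-inf') is modelled as `none`; Python's max(acc, x) on this accumulator:
def pvOmax (a : Option Int) (x : Int) : Option Int :=
  some (match a with | none => x | some v => max v x)

-- the body of A's two inner loops for the subarray A[l..r]; the indices l+i, r-i and
-- l+length//2 are always in range 0..len(A)-1, so Python's A[...] is ported as getD.
-- The final .getD 0 never fires: the even branch folds over at least one pair and the
-- odd branch always takes the middle element, so the accumulator ends as `some _`.
def pvInnerA (A : List Int) (l r : Nat) : Int :=
  ((if (r - l + 1) % 2 == 0 then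
      (List.range ((r - l + 1) / 2)).foldl
        (fun acc i => pvOmax acc (A.getD (l + i) 0 + A.getD (r - i) 0)) none
    else
      pvOmax ((List.range ((r - l + 1) / 2)).foldl
        (fun acc i => pvOmax acc (A.getD (l + i) 0 + A.getD (r - i) 0)) none)
        (A.getD (l + (r - l + 1) / 2) 0))).getD 0

-- range(l, N) is List.range' l (N - l)
def calculate_optimal_cost (A : List Int) : List Int :=
  (List.range A.length).foldl (fun acc l =>
    (List.range' l (A.length - l)).foldl (fun acc2 r => acc2 ++ [pvInnerA A l r]) acc) []

-- ===== PORT B =====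
-- one row of B's DP: costs for left index l, given the already-computed row for l+1
def pvRowB (A : List Int) (l : Nat) (prev : List Int) : List Int :=
  (List.range' (l+1) (A.length - (l+1))).foldl
    (fun row r =>
      row ++ [if l + 2 ≤ r then
                max (A.getD l 0 + A.getD r 0) (prev.getD (r - l - 2) 0)
              else A.getD l 0 + A.getD r 0])
    [A.getD l 0]

-- range(N-1, -1, -1) is (List.range N).reverse; the fold state is (rows, prev)
def calculate_optimal_cost_alt (A : List Int) : List Int :=
  ((((List.range A.length).reverse).foldl
      (fun (st : List (List Int) × List Int) l =>
        let row := pvRowB A l st.2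
        (st.1 ++ [row], row)) ([], [])).1).reverse.flatten

-- ===== PRECONDITION & SPEC =====
def Spec_calculate_optimal_cost (A : List Int) (out : List Int) : Prop := out = calculate_optimal_cost_alt A
instance (A : List Int) (out : List Int) : Decidable (Spec_calculate_optimal_cost A out) := by unfold Spec_calculate_optimal_cost; infer_instance

-- ===== CLAIM (what is proved, stated in full; the proofs are below) =====
def Claim_equal_calculate_optimal_cost : Prop := ∀ (A : List Int), Dom_calculate_optimal_cost A → Spec_calculate_optimal_cost A (calculate_optimal_cost A)

-- ===== LEMMAS AND PROOFS =====

-- the common value both programs compute for the subarray A[l..r]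
def pvSpec (A : List Int) (l r : Nat) : Int :=
  if _h : l + 2 ≤ r then
    max (A.getD l 0 + A.getD r 0) (pvSpec A (l+1) (r-1))
  else if l < r then A.getD l 0 + A.getD r 0
  else A.getD l 0
termination_by r - l
decreasing_by omega

-- running max over t 0, …, t (h-1) started at v
def pvG (t : Nat → Int) (h : Nat) (v : Int) : Int :=
  (List.range h).foldl (fun a i => max a (t i)) v

lemma pvOmax_none (x : Int) : pvOmax none x = some x := rfl

lemma pvOmax_some (v x : Int) : pvOmax (some v) x = some (max v x) := rfl

lemma pvG_pull (t : Nat → Int) (h : Nat) (v w : Int) :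
    pvG t h (max v w) = max v (pvG t h w) := by
  induction h with
  | zero => simp [pvG]
  | succ n ih =>
      simp only [pvG, List.range_succ, List.foldl_append, List.foldl_cons, List.foldl_nil] at ih ⊢
      rw [ih, max_assoc]

lemma pvG_step (t : Nat → Int) (h : Nat) (v : Int) :
    pvG t (h+1) v = max v (pvG (fun i => t (i+1)) h (t 0)) := by
  have h1 : pvG t (h+1) v = pvG (fun i => t (i+1)) h (max v (t 0)) := by
    simp only [pvG, List.range_succ_eq_map, List.foldl_cons, List.foldl_map, Nat.succ_eq_add_one]
  rw [h1, pvG_pull]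

lemma pvG_step' (t : Nat → Int) (h : Nat) (hh : 1 ≤ h) (v : Int) :
    pvG t h v = max v (pvG (fun i => t (i+1)) (h-1) (t 0)) := by
  obtain ⟨k, rfl⟩ : ∃ k, h = k + 1 := ⟨h-1, by omega⟩
  simpa using pvG_step t k v

lemma pvOpt (t : Nat → Int) (h : Nat) (v : Int) :
    (List.range h).foldl (fun a i => pvOmax a (t i)) (some v) = some (pvG t h v) := by
  induction h with
  | zero => simp [pvG]
  | succ n ih =>
      simp only [pvG, List.range_succ, List.foldl_append, List.foldl_cons, List.foldl_nil] at ih ⊢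
      rw [ih, pvOmax_some]

lemma pvOptNone (t : Nat → Int) (h : Nat) :
    (List.range (h+1)).foldl (fun a i => pvOmax a (t i)) none
      = some (pvG (fun i => t (i+1)) h (t 0)) := by
  simp only [List.range_succ_eq_map, List.foldl_cons, List.foldl_map, Nat.succ_eq_add_one,
    pvOmax_none]
  exact pvOpt (fun i => t (i+1)) h (t 0)

-- closed form of A's inner loops for l < r, as a pvG over the shifted pair sums
lemma innerA_closed (A : List Int) (l r h : Nat) (_hlr : l < r) (hh : (r - l + 1) / 2 = h + 1) :
    pvInnerA A l r =
      if (r - l + 1) % 2 = 0 then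
        pvG (fun i => A.getD (l+1+i) 0 + A.getD (r-1-i) 0) h (A.getD l 0 + A.getD r 0)
      else
        max (pvG (fun i => A.getD (l+1+i) 0 + A.getD (r-1-i) 0) h (A.getD l 0 + A.getD r 0))
          (A.getD (l + (h+1)) 0) := by
  have tsh : (fun i => A.getD (l+(i+1)) 0 + A.getD (r-(i+1)) 0)
      = (fun i => A.getD (l+1+i) 0 + A.getD (r-1-i) 0) := by
    funext i
    rw [show l+(i+1) = l+1+i by omega, show r-(i+1) = r-1-i by omega]
  unfold pvInnerA
  rw [hh, pvOptNone]
  simp only [beq_iff_eq, Nat.add_zero, Nat.sub_zero, tsh, pvOmax_some]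
  split_ifs <;> simp

lemma tshift2 (A : List Int) (l r k : Nat) :
    pvG (fun i => A.getD (l+1+(i+1)) 0 + A.getD (r-1-(i+1)) 0) k
        (A.getD (l+1+0) 0 + A.getD (r-1-0) 0)
      = pvG (fun i => A.getD (l+1+1+i) 0 + A.getD (r-1-1-i) 0) k
        (A.getD (l+1) 0 + A.getD (r-1) 0) := by
  have hf : (fun i => A.getD (l+1+(i+1)) 0 + A.getD (r-1-(i+1)) 0)
      = (fun i : Nat => A.getD (l+1+1+i) 0 + A.getD (r-1-1-i) 0) := by
    funext i
    rw [show l+1+(i+1) = l+1+1+i by omega, show r-1-(i+1) = r-1-1-i by omega]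
  rw [hf, Nat.add_zero, Nat.sub_zero]

lemma innerA_base1 (A : List Int) (l : Nat) : pvInnerA A l l = A.getD l 0 := by
  simp [pvInnerA, pvOmax]

lemma innerA_base2 (A : List Int) (l : Nat) :
    pvInnerA A l (l+1) = A.getD l 0 + A.getD (l+1) 0 := by
  simp [pvInnerA, pvOmax]

-- A's inner loops satisfy B's recurrence
lemma innerA_rec (A : List Int) (l r : Nat) (hlr : l + 2 ≤ r) :
    pvInnerA A l r = max (A.getD l 0 + A.getD r 0) (pvInnerA A (l+1) (r-1)) := by
  have hout : (r - l + 1) / 2 = ((r - l + 1) / 2 - 1) + 1 := by omega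
  set h : Nat := (r - l + 1) / 2 - 1 with hdef
  rw [innerA_closed A l r h (by omega) hout]
  by_cases hpar : (r - l + 1) % 2 = 0
  · rw [if_pos hpar]
    have hin : (r - 1 - (l+1) + 1) / 2 = (h - 1) + 1 := by omega
    rw [innerA_closed A (l+1) (r-1) (h-1) (by omega) hin,
        if_pos (by omega : (r - 1 - (l+1) + 1) % 2 = 0),
        pvG_step' _ h (by omega), tshift2]
  · rw [if_neg hpar]
    by_cases h0 : h = 0
    · rw [h0]
      have hr1 : r - 1 = l + 1 := by omega
      rw [hr1, innerA_base1]
      simp [pvG]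
    · have hin : (r - 1 - (l+1) + 1) / 2 = (h - 1) + 1 := by omega
      rw [innerA_closed A (l+1) (r-1) (h-1) (by omega) hin,
          if_neg (by omega : ¬ (r - 1 - (l+1) + 1) % 2 = 0),
          pvG_step' _ h (by omega), tshift2, max_assoc,
          show l + (h+1) = l+1+(h-1+1) by omega]

lemma innerA_eq_spec (A : List Int) :
    ∀ d l r, l ≤ r → r - l = d → pvInnerA A l r = pvSpec A l r := by
  intro d
  induction d using Nat.strong_induction_on with
  | _ d ih =>
    intro l r hlr hd
    by_cases h2 : l + 2 ≤ r
    · conv_rhs => rw [pvSpec]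
      rw [dif_pos h2, innerA_rec A l r h2,
        ih (d - 2) (by omega) (l+1) (r-1) (by omega) (by omega)]
    · by_cases h1 : l < r
      · have h3 : r = l + 1 := by omega
        rw [h3]
        rw [pvSpec, dif_neg (by omega), if_pos (by omega)]
        exact innerA_base2 A l
      · have h3 : r = l := by omega
        rw [h3]
        rw [pvSpec, dif_neg (by omega), if_neg (by omega)]
        exact innerA_base1 A l

-- B-side: the specified row for left index l
def pvRowSpec (A : List Int) (l : Nat) : List Int :=
  (List.range' l (A.length - l)).map (fun r => pvSpec A l r)

lemma rowB_eq (A : List Int) (l : Nat) (hl : l < A.length) :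
    pvRowB A l (pvRowSpec A (l+1)) = pvRowSpec A l := by
  unfold pvRowB pvRowSpec
  rw [PySem.List.foldl_append_singleton_eq_map]
  rw [show A.length - l = (A.length - (l+1)) + 1 by omega, List.range'_succ]
  rw [List.map_cons, List.singleton_append]
  congr 1
  · rw [pvSpec, dif_neg (by omega), if_neg (by omega)]
  · apply List.map_congr_left
    intro r hr
    have hmem := List.mem_range'_1.mp hr
    by_cases h2 : l + 2 ≤ r
    · rw [if_pos h2]
      conv_rhs => rw [pvSpec]
      rw [dif_pos h2]
      congr 1
      have hlen : (r - l - 2) <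
          ((List.range' (l+1) (A.length - (l+1))).map (fun r => pvSpec A (l+1) r)).length := by
        simp; omega
      rw [List.getD_eq_getElem _ _ hlen, List.getElem_map, List.getElem_range']
      congr 1
      omega
    · rw [if_neg h2]
      rw [pvSpec, dif_neg h2, if_pos (by omega)]

lemma outerB_eq (A : List Int) : ∀ (j : Nat), j ≤ A.length → ∀ (acc : List (List Int)),
    ((List.range j).reverse).foldl
      (fun (st : List (List Int) × List Int) l =>
        let row := pvRowB A l st.2
        (st.1 ++ [row], row)) (acc, pvRowSpec A j)
    = (acc ++ ((List.range j).reverse).map (pvRowSpec A), pvRowSpec A 0) := by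
  intro j
  induction j with
  | zero => intro _ acc; simp
  | succ n ih =>
      intro hn acc
      rw [List.range_succ, List.reverse_append]
      simp only [List.reverse_cons, List.reverse_nil, List.nil_append, List.cons_append,
        List.foldl_cons, List.map_cons]
      rw [rowB_eq A n (by omega)]
      rw [ih (by omega) (acc ++ [pvRowSpec A n])]
      simp

lemma altB_eq (A : List Int) :
    calculate_optimal_cost_alt A = ((List.range A.length).map (pvRowSpec A)).flatten := by
  unfold calculate_optimal_cost_alt
  have hinit : ([] : List Int) = pvRowSpec A A.length := by
    unfold pvRowSpec
    simp
  rw [hinit, outerB_eq A A.length (le_refl _) []]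
  simp

-- ===== VERDICT (by name: the statement is the Claim_ definition above) =====
theorem calculate_optimal_cost_spec : Claim_equal_calculate_optimal_cost := by
  intro A _
  unfold Spec_calculate_optimal_cost
  rw [altB_eq]
  unfold calculate_optimal_cost
  simp only [PySem.List.foldl_append_singleton_eq_map]
  rw [PySem.List.foldl_append_eq_flatMap, List.nil_append, List.flatMap_def]
  congr 1
  apply List.map_congr_left
  intro l hl
  unfold pvRowSpec
  apply List.map_congr_left
  intro r hr
  have hmem := List.mem_range'_1.mp hr
  exact innerA_eq_spec A (r - l) l r (by omega) rfl
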